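-- pv_equiv track=rewrite | github.com/andrew-hardwick/advent-of-code | 2015/15/p1.py | get_max_properties
-- ===== SOURCE A (Python) =====
-- def get_max_properties(
-- 		ingredients):
-- 	max_properties = []
--
-- 	for ingredient in ingredients:
-- 		for index, prop in enumerate(ingredient['properties']):
-- 			if index >= len(max_properties):
-- 				max_properties.append(prop)
-- 			else:
-- 				max_properties[index] = max(max_properties[index], prop)
--
-- 	return max_properties
-- ===== SOURCE B (Python) =====
-- def get_max_properties(ingredients):
--     columns = [ing['properties'] for ing in ingredients]
--     width = max((len(p) for p in columns), default=0)
--     return [max(p[i] for p in columns if i < len(p)) for i in range(width)]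
-- ===== Notes on version B (the rewrite author's own statement) =====
-- stated objective: alternative
-- what changed: B transposes the data: it computes the result width once and then reduces each column (index) with max over the property vectors that reach it, instead of A's single forward pass that mutates a growing accumulator with append-or-update per element.
import Mathlib
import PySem

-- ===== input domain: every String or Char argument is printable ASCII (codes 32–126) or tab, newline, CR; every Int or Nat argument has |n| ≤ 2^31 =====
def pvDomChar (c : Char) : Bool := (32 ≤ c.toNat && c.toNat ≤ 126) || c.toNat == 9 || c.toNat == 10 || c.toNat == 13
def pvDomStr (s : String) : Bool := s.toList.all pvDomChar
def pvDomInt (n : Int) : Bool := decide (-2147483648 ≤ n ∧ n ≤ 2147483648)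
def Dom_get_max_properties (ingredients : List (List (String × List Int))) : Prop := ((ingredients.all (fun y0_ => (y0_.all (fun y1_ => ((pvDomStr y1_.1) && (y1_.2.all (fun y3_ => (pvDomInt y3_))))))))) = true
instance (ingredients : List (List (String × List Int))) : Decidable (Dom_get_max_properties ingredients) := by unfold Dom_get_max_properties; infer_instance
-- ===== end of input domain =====

-- B replaces A's single mutating forward pass by a transpose: compute the width, then reduce
-- each column with max over the vectors that reach it (alternative decomposition, same cost class).


-- ===== PORT A =====
-- ingredient['properties']: first-match lookup; Pre_ guarantees the key is present, so getD [] is exact there.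
-- The inner loop is A's enumerate fold: the index from enumerate is ≥ 0, and in the else-branch it is < len,
-- so .toNat is exact there.
def get_max_properties (ingredients : List (List (String × List Int))) : List Int :=
  ingredients.foldl (fun mp ing =>
    (PySem.List.enumerate ((ing.lookup "properties").getD []) 0).foldl
      (fun mp ip =>
        if (mp.length : Int) ≤ ip.1 then mp ++ [ip.2]
        else mp.set ip.1.toNat (max (mp.getD ip.1.toNat 0) ip.2)) mp) []

-- ===== PORT B =====
-- max(gen, default=0) over lengths ported as a fold; the inner max over a column is nonempty whenever
-- i < width, so the [] branch (Python would raise there) is unreachable; 0 is a placeholder comment-wise.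
def get_max_properties_alt (ingredients : List (List (String × List Int))) : List Int :=
  let columns := ingredients.map (fun ing => (ing.lookup "properties").getD [])
  let width := columns.foldl (fun w p => max w p.length) 0
  (List.range width).map (fun i =>
    match columns.filterMap (fun p => p[i]?) with
    | [] => 0
    | c :: cs => cs.foldl max c)

-- ===== PRECONDITION & SPEC =====
-- Pre_ excludes exactly the inputs where Python A raises KeyError: an ingredient without a "properties" key.
def Pre_get_max_properties (ingredients : List (List (String × List Int))) : Prop :=
  ∀ ing ∈ ingredients, (ing.lookup "properties").isSome = true
instance (ingredients : List (List (String × List Int))) : Decidable (Pre_get_max_properties ingredients) := by unfold Pre_get_max_properties; infer_instance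
def pvWitness_get_max_properties : (List (List (String × List Int))) :=
  [[("properties", [1, -2, 3])], [("properties", [2, 0])]]

def Spec_get_max_properties (ingredients : List (List (String × List Int))) (out : List Int) : Prop := out = get_max_properties_alt ingredients
instance (ingredients : List (List (String × List Int))) (out : List Int) : Decidable (Spec_get_max_properties ingredients out) := by unfold Spec_get_max_properties; infer_instance

-- ===== CLAIM (what is proved, stated in full; the proofs are below) =====
def Claim_equal_get_max_properties : Prop := ∀ (ingredients : List (List (String × List Int))), Dom_get_max_properties ingredients → Pre_get_max_properties ingredients → Spec_get_max_properties ingredients (get_max_properties ingredients)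

-- ===== LEMMAS AND PROOFS =====

-- elementwise max of two vectors, padding with the longer one
def pvMerge : List Int → List Int → List Int
  | [], b => b
  | a, [] => a
  | a :: as, b :: bs => max a b :: pvMerge as bs

-- max on optional values (missing = absent column entry)
def pvOMax : Option Int → Option Int → Option Int
  | none, b => b
  | some a, none => some a
  | some a, some b => some (max a b)

-- A's inner loop, index-explicit
def pvMergeAux : Nat → List Int → List Int → List Int
  | _, mp, [] => mp
  | s, mp, p :: ps =>
    if mp.length ≤ s then pvMergeAux (s + 1) (mp ++ [p]) ps
    else pvMergeAux (s + 1) (mp.set s (max (mp.getD s 0) p)) ps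

theorem pvInner_eq_aux (props : List Int) : ∀ (s : Nat) (mp : List Int),
    (PySem.List.enumerate props (s : Int)).foldl
      (fun mp ip =>
        if (mp.length : Int) ≤ ip.1 then mp ++ [ip.2]
        else mp.set ip.1.toNat (max (mp.getD ip.1.toNat 0) ip.2)) mp
      = pvMergeAux s mp props := by
  induction props with
  | nil => intro s mp; simp [PySem.List.enumerate_nil, pvMergeAux]
  | cons p ps ih =>
    intro s mp
    rw [PySem.List.enumerate_cons, List.foldl_cons]
    have hcast : ((s : Int) + 1) = ((s + 1 : Nat) : Int) := by push_cast; ring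
    by_cases h : mp.length ≤ s
    · have h' : (mp.length : Int) ≤ (s : Int) := by exact_mod_cast h
      simp only [h', if_pos, pvMergeAux, h, hcast]
      exact ih (s + 1) (mp ++ [p])
    · have h' : ¬ (mp.length : Int) ≤ (s : Int) := by exact_mod_cast h
      simp only [h', if_neg, not_false_iff, pvMergeAux, h, Int.toNat_natCast, hcast]
      exact ih (s + 1) (mp.set s (max (mp.getD s 0) p))

theorem pvMergeAux_eq (props : List Int) : ∀ (s : Nat) (mp : List Int), s ≤ mp.length →
    pvMergeAux s mp props = mp.take s ++ pvMerge (mp.drop s) props := by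
  induction props with
  | nil =>
    intro s mp _
    have hm : pvMerge (mp.drop s) [] = mp.drop s := by cases mp.drop s <;> rfl
    rw [show pvMergeAux s mp [] = mp from rfl, hm, List.take_append_drop]
  | cons p ps ih =>
    intro s mp hs
    by_cases h : mp.length ≤ s
    · have hse : s = mp.length := le_antisymm hs h
      subst hse
      rw [pvMergeAux, if_pos h, ih (mp.length + 1) (mp ++ [p]) (by simp)]
      rw [List.take_of_length_le (by simp), List.take_length,
          List.drop_eq_nil_of_le (by simp), List.drop_eq_nil_of_le (le_refl _)]
      cases ps <;> simp [pvMerge]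
    · have hlt : s < mp.length := lt_of_not_ge h
      rw [pvMergeAux, if_neg h, ih (s + 1) _ (by simpa using hlt)]
      have hdrop : mp.drop s = mp[s] :: mp.drop (s + 1) := List.drop_eq_getElem_cons hlt
      have hgd : mp.getD s 0 = mp[s] := by simp [List.getD, hlt]
      rw [hgd]
      have hset : mp.set s (max mp[s] p)
          = (mp.take s ++ [max mp[s] p]) ++ mp.drop (s+1) := by
        rw [List.set_eq_take_append_cons_drop, if_pos hlt]; simp
      have hlen : (mp.take s ++ [max mp[s] p]).length = s + 1 := by
        simp [List.length_take, Nat.min_eq_left (le_of_lt hlt)]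
      have h1 : (mp.set s (max mp[s] p)).take (s+1) = mp.take s ++ [max mp[s] p] := by
        rw [hset, ← hlen, List.take_left]
      have h2 : (mp.set s (max mp[s] p)).drop (s+1) = mp.drop (s+1) := by
        rw [hset, ← hlen, List.drop_left]
      rw [h1, h2, hdrop]
      simp [pvMerge]

theorem pvMerge_get? : ∀ (a b : List Int) (i : Nat),
    (pvMerge a b)[i]? = pvOMax a[i]? b[i]?
  | [], b, i => by
    cases h : b[i]? <;> simp [pvMerge, pvOMax, h]
  | x :: xs, [], i => by
    cases h : (x :: xs)[i]? <;> simp [pvMerge, pvOMax, h]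
  | x :: xs, y :: ys, 0 => by simp [pvMerge, pvOMax]
  | x :: xs, y :: ys, n + 1 => by simp [pvMerge, pvOMax, pvMerge_get? xs ys n]

theorem pvFold_merge_get? (ps : List (List Int)) : ∀ (acc : List Int) (i : Nat),
    (ps.foldl pvMerge acc)[i]? = ps.foldl (fun o p => pvOMax o p[i]?) acc[i]? := by
  induction ps with
  | nil => intro acc i; rfl
  | cons p ps ih =>
    intro acc i
    simp only [List.foldl_cons, ih, pvMerge_get?]

theorem pvFold_omax_some (i : Nat) (cols : List (List Int)) : ∀ (a : Int),
    cols.foldl (fun o p => pvOMax o p[i]?) (some a)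
      = some ((cols.filterMap (fun p => p[i]?)).foldl max a) := by
  induction cols with
  | nil => intro a; rfl
  | cons q qs ih =>
    intro a
    cases h : q[i]? with
    | none =>
      simp only [List.foldl_cons, h]
      rw [show pvOMax (some a) none = some a from rfl, ih a]
      simp [h]
    | some v =>
      simp only [List.foldl_cons, h]
      rw [show pvOMax (some a) (some v) = some (max a v) from rfl, ih (max a v)]
      simp [h]

theorem pvFold_omax_none (i : Nat) (cols : List (List Int)) :
    cols.foldl (fun o p => pvOMax o p[i]?) none
      = match cols.filterMap (fun p => p[i]?) with
        | [] => none
        | c :: cs => some (cs.foldl max c) := by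
  induction cols with
  | nil => rfl
  | cons q qs ih =>
    cases h : q[i]? with
    | none =>
      simp only [List.foldl_cons, h]
      rw [show pvOMax none none = none from rfl, ih]
      simp [h]
    | some v =>
      simp only [List.foldl_cons, h]
      rw [show pvOMax none (some v) = some v from rfl, pvFold_omax_some i qs v]
      simp [h]

theorem pvWidth_lt (i : Nat) (cols : List (List Int)) : ∀ (a : Nat),
    (i < cols.foldl (fun w p => max w p.length) a) ↔ (i < a ∨ ∃ p ∈ cols, i < p.length) := by
  induction cols with
  | nil => intro a; simp
  | cons c cs ih =>
    intro a
    simp only [List.foldl_cons, ih, List.mem_cons]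
    constructor
    · rintro (h | ⟨p, hp, hi⟩)
      · rcases lt_max_iff.mp h with h | h
        · exact Or.inl h
        · exact Or.inr ⟨c, Or.inl rfl, h⟩
      · exact Or.inr ⟨p, Or.inr hp, hi⟩
    · rintro (h | ⟨p, hp | hp, hi⟩)
      · exact Or.inl (lt_max_iff.mpr (Or.inl h))
      · exact Or.inl (lt_max_iff.mpr (Or.inr (hp ▸ hi)))
      · exact Or.inr ⟨p, hp, hi⟩

theorem pvA_eq_fold (ingredients : List (List (String × List Int))) :
    get_max_properties ingredients
      = (ingredients.map (fun ing => (ing.lookup "properties").getD [])).foldl pvMerge [] := by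
  rw [List.foldl_map]
  unfold get_max_properties
  congr 1
  funext mp ing
  have h0 : PySem.List.enumerate ((ing.lookup "properties").getD []) (0 : Int)
      = PySem.List.enumerate ((ing.lookup "properties").getD []) ((0 : Nat) : Int) := by
    norm_num
  rw [h0, pvInner_eq_aux, pvMergeAux_eq _ 0 mp (Nat.zero_le _)]
  simp

-- ===== VERDICT (by name: the statement is the Claim_ definition above) =====
theorem get_max_properties_spec : Claim_equal_get_max_properties := by
  intro ingredients _ _
  unfold Spec_get_max_properties get_max_properties_alt
  rw [pvA_eq_fold]
  set cols := ingredients.map (fun ing => (ing.lookup "properties").getD []) with hcols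
  apply List.ext_getElem?
  intro i
  rw [pvFold_merge_get?]
  rw [show (([] : List Int))[i]? = none from rfl, pvFold_omax_none]
  by_cases hw : i < cols.foldl (fun w p => max w p.length) 0
  · rw [List.getElem?_map, List.getElem?_range hw]
    cases h : cols.filterMap (fun p => p[i]?) with
    | nil =>
      exfalso
      rcases (pvWidth_lt i cols 0).mp hw with h0 | ⟨p, hp, hi⟩
      · omega
      · have hn : p[i]? = none := by
          by_contra hne
          have : i < p.length := by
            rw [List.getElem?_eq_none_iff] at hne; omega
          exact absurd (List.filterMap_eq_nil_iff.mp h p hp) (by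
            simp [List.getElem?_eq_getElem this])
        rw [List.getElem?_eq_none_iff] at hn
        omega
    | cons q qs => simp only [h, Option.map_some]
  · rw [List.getElem?_map, List.getElem?_eq_none (by simpa using hw)]
    cases h : cols.filterMap (fun p => p[i]?) with
    | nil => simp
    | cons q qs =>
      exfalso
      have hq : q ∈ cols.filterMap (fun p => p[i]?) := by rw [h]; exact List.mem_cons_self
      rcases List.mem_filterMap.mp hq with ⟨p, hp, hpi⟩
      have hi : i < p.length := by
        by_contra hle
        rw [List.getElem?_eq_none_iff.mpr (by omega)] at hpi
        simp at hpi
      exact hw ((pvWidth_lt i cols 0).mpr (Or.inr ⟨p, hp, hi⟩))
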